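-- pv_equiv track=rewrite | github.com/rhombicosi/LILP | LILP/utils/sol_converter.py | brackets2pairs
-- ===== SOURCE A (Python) =====
-- def brackets2pairs(dot_bracket):
--     pair_stack = []
--     base_pairs = []
--
--     for i, symbol in enumerate(dot_bracket, start=1):
--         if symbol in "({[":
--             pair_stack.append(i)
--         elif symbol in ")}]":
--             if pair_stack:
--                 j = pair_stack.pop()
--                 base_pairs.append((j, i))
--
--     sorted_bp = sorted(base_pairs, key=lambda x: x[0])
--
--     return sorted_bp
-- ===== SOURCE B (Python) =====
-- def brackets2pairs(dot_bracket):
--     # Tree-style accumulation instead of collect-then-sort: each opening bracket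
--     # starts a fresh segment; its closing splices (open, close) in front of the
--     # inner segment, so the pairs come out already ordered by opening position
--     # and no sort is needed.
--     stack = []          # entries: (opening index, segment collected before it)
--     cur = []
--     i = 0
--     for symbol in dot_bracket:
--         i += 1
--         if symbol in "({[":
--             stack.append((i, cur))
--             cur = []
--         elif symbol in ")}]" and stack:
--             j, prev = stack.pop()
--             prev.append((j, i))
--             prev.extend(cur)
--             cur = prev
--     while stack:
--         _, prev = stack.pop()
--         prev.extend(cur)
--         cur = prev
--     return cur
-- ===== Notes on version B (the rewrite author's own statement) =====
-- stated objective: alternative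
-- what changed: B drops A's final comparison sort: each opening bracket starts a fresh segment on the stack and its closer splices the pair in front of the inner segment, so the pairs are produced already ordered by opening position.
import Mathlib
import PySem

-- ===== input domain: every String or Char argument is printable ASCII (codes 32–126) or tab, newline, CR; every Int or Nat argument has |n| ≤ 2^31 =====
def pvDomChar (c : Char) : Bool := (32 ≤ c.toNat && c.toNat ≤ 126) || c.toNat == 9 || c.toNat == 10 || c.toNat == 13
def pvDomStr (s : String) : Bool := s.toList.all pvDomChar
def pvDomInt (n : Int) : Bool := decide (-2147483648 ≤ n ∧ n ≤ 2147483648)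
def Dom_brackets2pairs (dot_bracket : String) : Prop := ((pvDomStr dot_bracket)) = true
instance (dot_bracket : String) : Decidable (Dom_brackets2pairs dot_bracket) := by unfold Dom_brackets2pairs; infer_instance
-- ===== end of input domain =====

-- B replaces A's collect-then-sort by tree-style accumulation: each opening bracket
-- starts a fresh segment and its closer splices the pair in front of the inner
-- segment, so the pairs emerge already ordered by opening position (no sort).


-- ===== PORT A =====
-- 'symbol in "({["' for a single character is exactly membership among its characters
def bpIsOpen (c : Char) : Bool := c ∈ ['(', '{', '[']
def bpIsClose (c : Char) : Bool := c ∈ [')', '}', ']']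

/-- A's for-loop over `enumerate(dot_bracket, start=1)`, state `(pair_stack, base_pairs)`;
    the stack top is kept at the head (Python appends/pops at the right end — the same stack). -/
def bpLoopA : List Char → Int → List Int → List (Int × Int) → List Int × List (Int × Int)
  | [], _, stk, prs => (stk, prs)
  | c :: rest, i, stk, prs =>
    if bpIsOpen c then bpLoopA rest (i + 1) (i :: stk) prs
    else if bpIsClose c then
      match stk with
      | [] => bpLoopA rest (i + 1) [] prs
      | j :: stk' => bpLoopA rest (i + 1) stk' (prs ++ [(j, i)])
    else bpLoopA rest (i + 1) stk prs

def brackets2pairs (dot_bracket : String) : List (Int × Int) :=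
  PySem.List.sorted (bpLoopA dot_bracket.toList 1 [] []).2 (fun x => x.1)

-- ===== PORT B =====
/-- B's for-loop: counter `i` incremented first; an opener pushes `(i+1, cur)` and starts a
    fresh segment, a closer (with nonempty stack) splices `prev ++ (j, i+1) :: cur`. -/
def bLoop : List Char → Int → List (Int × List (Int × Int)) → List (Int × Int) →
    List (Int × List (Int × Int)) × List (Int × Int)
  | [], _, stack, cur => (stack, cur)
  | symbol :: rest, i, stack, cur =>
    if symbol == '(' || symbol == '{' || symbol == '[' then
      bLoop rest (i + 1) ((i + 1, cur) :: stack) []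
    else
      match stack, symbol == ')' || symbol == '}' || symbol == ']' with
      | (j, prev) :: stack', true => bLoop rest (i + 1) stack' (prev ++ (j, i + 1) :: cur)
      | stack, _ => bLoop rest (i + 1) stack cur

/-- B's final `while stack:` unwinding, dropping unmatched openers. -/
def bUnwind : List (Int × List (Int × Int)) → List (Int × Int) → List (Int × Int)
  | [], cur => cur
  | (_, prev) :: stack', cur => bUnwind stack' (prev ++ cur)

def brackets2pairs_alt (dot_bracket : String) : List (Int × Int) :=
  let r := bLoop dot_bracket.toList 0 [] []
  bUnwind r.1 r.2

-- ===== PRECONDITION & SPEC =====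
def Spec_brackets2pairs (dot_bracket : String) (out : List (Int × Int)) : Prop := out = brackets2pairs_alt dot_bracket
instance (dot_bracket : String) (out : List (Int × Int)) : Decidable (Spec_brackets2pairs dot_bracket out) := by unfold Spec_brackets2pairs; infer_instance

-- ===== CLAIM (what is proved, stated in full; the proofs are below) =====
def Claim_equal_brackets2pairs : Prop := ∀ (dot_bracket : String), Dom_brackets2pairs dot_bracket → Spec_brackets2pairs dot_bracket (brackets2pairs dot_bracket)

-- ===== LEMMAS AND PROOFS =====

lemma bpOpen_iff (c : Char) : (c == '(' || c == '{' || c == '[') = bpIsOpen c := by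
  simp [bpIsOpen, List.mem_cons, Bool.or_assoc, beq_eq_decide]

lemma bpClose_iff (c : Char) : (c == ')' || c == '}' || c == ']') = bpIsClose c := by
  simp [bpIsClose, List.mem_cons, Bool.or_assoc, beq_eq_decide]

lemma bUnwind_perm_congr {l₁ l₂ : List (Int × Int)} (stk : List (Int × List (Int × Int)))
    (h : l₁.Perm l₂) : (bUnwind stk l₁).Perm (bUnwind stk l₂) := by
  induction stk generalizing l₁ l₂ with
  | nil => exact h
  | cons e stk ih => exact ih (h.append_left e.2)

lemma bUnwind_cons (stk : List (Int × List (Int × Int))) (x : Int × Int)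
    (cur : List (Int × Int)) : (bUnwind stk (x :: cur)).Perm (x :: bUnwind stk cur) := by
  induction stk generalizing cur with
  | nil => exact List.Perm.refl _
  | cons e stk ih =>
    obtain ⟨a, prev⟩ := e
    exact (bUnwind_perm_congr stk (List.perm_middle (a := x) (l₁ := prev))).trans (ih (prev ++ cur))

/-- Joint loop invariant (permutation part): A's collected pairs stay a permutation of
    B's flattened segment structure. -/
lemma bLoop_perm :
    ∀ (cs : List Char) (k : Int) (stkB : List (Int × List (Int × Int)))
      (cur : List (Int × Int)) (prs : List (Int × Int)),
    prs.Perm (bUnwind stkB cur) →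
    (bpLoopA cs (k + 1) (stkB.map Prod.fst) prs).2.Perm
      (bUnwind (bLoop cs k stkB cur).1 (bLoop cs k stkB cur).2) := by
  intro cs
  induction cs with
  | nil => intro k stkB cur prs h; simpa [bpLoopA, bLoop] using h
  | cons c rest ih =>
    intro k stkB cur prs h
    by_cases hop : bpIsOpen c
    · simp only [bpLoopA, bLoop, bpOpen_iff, hop, if_true]
      exact ih (k + 1) ((k + 1, cur) :: stkB) [] prs (by simpa [bUnwind] using h)
    · have hop' : bpIsOpen c = false := by simpa using hop
      by_cases hcl : bpIsClose c
      · cases stkB with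
        | nil =>
          simp only [bpLoopA, bLoop, bpOpen_iff, hop', hcl, List.map_nil,
            Bool.false_eq_true, if_false, if_true]
          exact ih (k + 1) [] cur prs h
        | cons e stkB' =>
          obtain ⟨j, prev⟩ := e
          simp only [bpLoopA, bLoop, bpOpen_iff, bpClose_iff, hop', hcl, List.map_cons,
            Bool.false_eq_true, if_false, if_true]
          apply ih
          have h1 : prs.Perm (bUnwind stkB' (prev ++ cur)) := h
          refine (List.perm_append_singleton _ _).trans ?_
          refine (h1.cons _).trans ?_
          refine (bUnwind_cons stkB' _ _).symm.trans ?_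
          exact (bUnwind_perm_congr stkB' List.perm_middle).symm
      · have hcl' : bpIsClose c = false := by simpa using hcl
        cases stkB with
        | nil =>
          simp only [bpLoopA, bLoop, bpOpen_iff, hop', hcl', List.map_nil,
            Bool.false_eq_true, if_false]
          exact ih (k + 1) [] cur prs h
        | cons e stkB' =>
          obtain ⟨j, prev⟩ := e
          simp only [bpLoopA, bLoop, bpOpen_iff, bpClose_iff, hop', hcl', List.map_cons,
            Bool.false_eq_true, if_false]
          exact ih (k + 1) ((j, prev) :: stkB') cur prs h

/-- Ordering invariant on B's state: every segment is strictly increasing in the opening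
    index, openings deeper in the stack are smaller, and everything is below the bound. -/
def BInv : List (Int × List (Int × Int)) → List (Int × Int) → Int → Prop
  | [], cur, b => cur.Pairwise (fun p q => p.1 < q.1) ∧ ∀ p ∈ cur, p.1 < b
  | (j, prev) :: stk, cur, b =>
      cur.Pairwise (fun p q => p.1 < q.1) ∧ (∀ p ∈ cur, j < p.1 ∧ p.1 < b) ∧ j < b ∧
      BInv stk prev j

lemma BInv_mono {stk cur b b'} (hb : b ≤ b') (h : BInv stk cur b) : BInv stk cur b' := by
  cases stk with
  | nil => exact ⟨h.1, fun p hp => lt_of_lt_of_le (h.2 p hp) hb⟩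
  | cons e stk =>
    obtain ⟨h1, h2, h3, h4⟩ := h
    exact ⟨h1, fun p hp => ⟨(h2 p hp).1, lt_of_lt_of_le (h2 p hp).2 hb⟩, lt_of_lt_of_le h3 hb, h4⟩

lemma BInv_close {j : Int} {prev : List (Int × Int)} {stk : List (Int × List (Int × Int))}
    {cur : List (Int × Int)} {k : Int} (h : BInv ((j, prev) :: stk) cur (k + 1)) :
    BInv stk (prev ++ (j, k + 1) :: cur) (k + 2) := by
  obtain ⟨hp, hb, hj, hrec⟩ := h
  cases stk with
  | nil =>
    obtain ⟨hpp, hpb⟩ := hrec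
    refine ⟨?_, ?_⟩
    · rw [List.pairwise_append]
      refine ⟨hpp, List.pairwise_cons.2 ⟨fun q hq => (hb q hq).1, hp⟩, ?_⟩
      intro x hx y hy
      rcases List.mem_cons.1 hy with rfl | hy
      · exact hpb x hx
      · exact lt_trans (hpb x hx) (hb y hy).1
    · intro p hp'
      rcases List.mem_append.1 hp' with h' | h'
      · exact lt_trans (hpb p h') (by omega)
      · rcases List.mem_cons.1 h' with rfl | h'
        · simp; omega
        · exact lt_trans (hb p h').2 (by omega)
  | cons e s =>
    obtain ⟨j', prev'⟩ := e
    obtain ⟨hpp, hpb, hj'j, hrec'⟩ := hrec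
    refine ⟨?_, ?_, by omega, hrec'⟩
    · rw [List.pairwise_append]
      refine ⟨hpp, List.pairwise_cons.2 ⟨fun q hq => (hb q hq).1, hp⟩, ?_⟩
      intro x hx y hy
      rcases List.mem_cons.1 hy with rfl | hy
      · exact (hpb x hx).2
      · exact lt_trans (hpb x hx).2 (hb y hy).1
    · intro p hp'
      rcases List.mem_append.1 hp' with h' | h'
      · exact ⟨(hpb p h').1, by have := (hpb p h').2; omega⟩
      · rcases List.mem_cons.1 h' with rfl | h'
        · exact ⟨by simpa using hj'j, by simp; omega⟩
        · exact ⟨lt_trans hj'j (hb p h').1, by have := (hb p h').2; omega⟩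

lemma bLoop_inv :
    ∀ (cs : List Char) (k : Int) (stk : List (Int × List (Int × Int))) (cur : List (Int × Int))
      (b : Int), BInv stk cur (k + 1) → k + cs.length + 1 ≤ b →
    BInv (bLoop cs k stk cur).1 (bLoop cs k stk cur).2 b := by
  intro cs
  induction cs with
  | nil =>
    intro k stk cur b h hle
    simp only [List.length_nil, Nat.cast_zero, add_zero] at hle
    exact BInv_mono hle h
  | cons c rest ih =>
    intro k stk cur b h hle
    simp only [List.length_cons, Nat.cast_add, Nat.cast_one] at hle
    by_cases h1 : (c == '(' || c == '{' || c == '[') = true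
    · simp only [bLoop, h1, if_true]
      refine ih (k + 1) _ [] b ⟨List.Pairwise.nil, by simp, by omega, h⟩ (by omega)
    · simp only [bLoop, h1, Bool.false_eq_true, if_false]
      cases stk with
      | nil =>
        cases h2 : (c == ')' || c == '}' || c == ']') <;>
          exact ih (k + 1) [] cur b (BInv_mono (by omega) h) (by omega)
      | cons e stk' =>
        obtain ⟨j, prev⟩ := e
        cases h2 : (c == ')' || c == '}' || c == ']')
        · exact ih (k + 1) _ cur b (BInv_mono (by omega) h) (by omega)
        · refine ih (k + 1) stk' (prev ++ (j, k + 1) :: cur) b ?_ (by omega)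
          have := BInv_close (j := j) (prev := prev) (stk := stk') (cur := cur) (k := k) h
          have harith : k + 2 = (k + 1) + 1 := by omega
          rwa [harith] at this

lemma BInv_pop {j : Int} {prev : List (Int × Int)} {stk : List (Int × List (Int × Int))}
    {cur : List (Int × Int)} {b : Int} (h : BInv ((j, prev) :: stk) cur b) :
    BInv stk (prev ++ cur) b := by
  obtain ⟨hp, hb, hj, hrec⟩ := h
  cases stk with
  | nil =>
    obtain ⟨hpp, hpb⟩ := hrec
    refine ⟨?_, ?_⟩
    · rw [List.pairwise_append]
      exact ⟨hpp, hp, fun x hx y hy => lt_trans (hpb x hx) (hb y hy).1⟩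
    · intro p hp'
      rcases List.mem_append.1 hp' with h' | h'
      · exact lt_trans (hpb p h') hj
      · exact (hb p h').2
  | cons e s =>
    obtain ⟨j', prev'⟩ := e
    obtain ⟨hpp, hpb, hj'j, hrec'⟩ := hrec
    refine ⟨?_, ?_, lt_trans hj'j hj, hrec'⟩
    · rw [List.pairwise_append]
      exact ⟨hpp, hp, fun x hx y hy => lt_trans (hpb x hx).2 (hb y hy).1⟩
    · intro p hp'
      rcases List.mem_append.1 hp' with h' | h'
      · exact ⟨(hpb p h').1, lt_trans (hpb p h').2 hj⟩
      · exact ⟨lt_trans hj'j (hb p h').1, (hb p h').2⟩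

lemma BInv_unwind : ∀ (stk : List (Int × List (Int × Int))) (cur : List (Int × Int)) (b : Int),
    BInv stk cur b → (bUnwind stk cur).Pairwise (fun p q => p.1 < q.1) := by
  intro stk
  induction stk with
  | nil => intro cur b h; exact h.1
  | cons e stk ih =>
    intro cur b h
    exact ih (e.2 ++ cur) b (BInv_pop h)

-- ===== VERDICT (by name: the statement is the Claim_ definition above) =====
theorem brackets2pairs_spec : Claim_equal_brackets2pairs := by
  unfold Claim_equal_brackets2pairs Spec_brackets2pairs
  intro s _
  unfold brackets2pairs brackets2pairs_alt
  set cs := s.toList with hcs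
  set prs := (bpLoopA cs 1 [] []).2 with hprs
  set F := bUnwind (bLoop cs 0 [] []).1 (bLoop cs 0 [] []).2 with hF
  have hperm : prs.Perm F := by
    have := bLoop_perm cs 0 [] [] [] (List.Perm.refl _)
    simpa using this
  have hpwF : F.Pairwise (fun p q : Int × Int => p.1 < q.1) := by
    have h0 : BInv ([] : List (Int × List (Int × Int))) ([] : List (Int × Int)) (0 + 1) := by
      exact ⟨List.Pairwise.nil, by simp⟩
    exact BInv_unwind _ _ _ (bLoop_inv cs 0 [] [] (0 + (cs.length : Int) + 1) h0 (le_refl _))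
  have hndF : (F.map Prod.fst).Nodup :=
    (List.pairwise_map.2 hpwF).imp (fun h => ne_of_lt h)
  have hnd : (prs.map Prod.fst).Nodup := ((hperm.map Prod.fst).nodup_iff).2 hndF
  have hpermS : (PySem.List.sorted prs (fun x => x.1)).Perm F :=
    (PySem.List.sorted_perm prs (fun x => x.1) false).trans hperm
  have hpwS : List.Pairwise (fun a b : Int × Int => a.1 < b.1)
      (PySem.List.sorted prs (fun x => x.1)) := by
    have hndS : ((PySem.List.sorted prs (fun x => x.1)).map Prod.fst).Nodup :=
      (((PySem.List.sorted_perm prs (fun x => x.1) false).map Prod.fst).nodup_iff).2 hnd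
    have hne := List.pairwise_map.1 hndS
    exact ((PySem.List.sorted_pairwise prs (fun x => x.1)).and hne).imp
      (fun h => lt_of_le_of_ne h.1 h.2)
  exact List.Perm.eq_of_pairwise (fun a b _ _ h1 h2 => absurd h2 (lt_asymm h1)) hpwS hpwF hpermS
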